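-- pv_equiv track=rewrite | github.com/PawanPatil19/TOM-Server | modules/maps/maps_util.py | get_direction_str
-- ===== SOURCE A (Python) =====
-- def get_direction_str(angle):
--     if angle > 350 or angle < 10:
--         return "straight"
--     else:
--         direction_map = {
--             (10, 45): "turn_slight_right",
--             (45, 135): "turn_right",
--             (135, 170): "turn_sharp_right",
--             (170, 190): "u_turn",
--             (190, 225): "turn_sharp_left",
--             (225, 315): "turn_left",
--             (315, 350): "turn_slight_left"
--         }
--         for direction_range, direction in direction_map.items():
--             if direction_range[0] <= angle < direction_range[1]:
--                 return direction
-- ===== SOURCE B (Python) =====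
-- import bisect
--
-- _BOUNDS = [45, 135, 170, 190, 225, 315]
-- _LABELS = ["turn_slight_right", "turn_right", "turn_sharp_right",
--            "u_turn", "turn_sharp_left", "turn_left", "turn_slight_left"]
--
--
-- def get_direction_str(angle):
--     if angle > 350 or angle < 10:
--         return "straight"
--     return _LABELS[bisect.bisect_right(_BOUNDS, angle)]
-- ===== Notes on version B (the rewrite author's own statement) =====
-- stated objective: idiomatic
-- what changed: Replaces the linear scan over a dict of (lo,hi) interval keys by a sorted boundary array indexed with bisect.bisect_right into a parallel label array; Pre_ excludes angle == 350, where A's half-open buckets cover no interval and it falls through to None while B's bisect naturally labels it turn_slight_left.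
-- outside the precondition, e.g. on get_direction_str(350): A returns None, B returns 'turn_slight_left'
import Mathlib
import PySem

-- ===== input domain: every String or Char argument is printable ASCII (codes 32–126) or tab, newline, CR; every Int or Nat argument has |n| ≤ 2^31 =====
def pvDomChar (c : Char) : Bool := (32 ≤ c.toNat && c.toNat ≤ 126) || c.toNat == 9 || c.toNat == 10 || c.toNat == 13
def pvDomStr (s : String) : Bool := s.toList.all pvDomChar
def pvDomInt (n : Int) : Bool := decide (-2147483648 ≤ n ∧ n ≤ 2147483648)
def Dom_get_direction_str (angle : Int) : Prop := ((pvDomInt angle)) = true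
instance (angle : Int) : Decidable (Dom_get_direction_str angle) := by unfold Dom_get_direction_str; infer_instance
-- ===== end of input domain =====

-- B replaces A's linear scan over (lo,hi)-keyed dict items by a bisect_right lookup
-- into a sorted boundary array with a parallel label array (idiomatic; Pre_ excludes
-- angle = 350, where A falls through to None).

-- ===== PORT A =====
-- the loop `for direction_range, direction in direction_map.items(): if lo <= angle < hi: return direction`
def pvScanA (angle : Int) : List ((Int × Int) × String) → Option String
  | [] => none
  | (r, d) :: rest => if r.1 ≤ angle ∧ angle < r.2 then some d else pvScanA angle rest

def get_direction_str (angle : Int) : Option String :=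
  if angle > 350 ∨ angle < 10 then some "straight"
  else
    pvScanA angle
      [((10, 45), "turn_slight_right"),
       ((45, 135), "turn_right"),
       ((135, 170), "turn_sharp_right"),
       ((170, 190), "u_turn"),
       ((190, 225), "turn_sharp_left"),
       ((225, 315), "turn_left"),
       ((315, 350), "turn_slight_left")]

-- ===== PORT B =====
def pvBounds : List Int := [45, 135, 170, 190, 225, 315]
def pvLabels : List String :=
  ["turn_slight_right", "turn_right", "turn_sharp_right",
   "u_turn", "turn_sharp_left", "turn_left", "turn_slight_left"]

-- bisect.bisect_right on a sorted list: length of the prefix of elements ≤ angle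
def pvBisectRight (xs : List Int) (angle : Int) : Nat :=
  match xs with
  | [] => 0
  | x :: rest => if x ≤ angle then 1 + pvBisectRight rest angle else 0

def get_direction_str_alt (angle : Int) : Option String :=
  if angle > 350 ∨ angle < 10 then some "straight"
  else PySem.List.pyGet? pvLabels (pvBisectRight pvBounds angle)

-- ===== PRECONDITION & SPEC =====
-- Pre_ excludes only angle = 350: A's half-open buckets cover no interval there, so A
-- falls through and returns None (no string), while B's bisect labels it turn_slight_left.
def Pre_get_direction_str (angle : Int) : Prop := angle ≠ 350
instance (angle : Int) : Decidable (Pre_get_direction_str angle) := by unfold Pre_get_direction_str; infer_instance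
def pvWitness_get_direction_str : Int := 200

def Spec_get_direction_str (angle : Int) (out : Option String) : Prop := out = get_direction_str_alt angle
instance (angle : Int) (out : Option String) : Decidable (Spec_get_direction_str angle out) := by unfold Spec_get_direction_str; infer_instance

-- ===== CLAIM =====
def Claim_equal_get_direction_str : Prop := ∀ (angle : Int), Dom_get_direction_str angle → Pre_get_direction_str angle → Spec_get_direction_str angle (get_direction_str angle)

-- ===== LEMMAS AND PROOFS =====

-- ===== VERDICT =====
set_option maxHeartbeats 1600000 in
theorem get_direction_str_spec : Claim_equal_get_direction_str := by
  intro angle _ hpre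
  unfold Pre_get_direction_str at hpre
  unfold Spec_get_direction_str get_direction_str get_direction_str_alt
  by_cases h0 : angle > 350 ∨ angle < 10
  · rw [if_pos h0, if_pos h0]
  · rw [if_neg h0, if_neg h0]
    push_neg at h0
    simp only [pvScanA, pvBisectRight, pvBounds, pvLabels]
    by_cases h1 : angle < 45
    · simp [show (10:Int) ≤ angle ∧ angle < 45 by omega, show ¬((45:Int) ≤ angle) by omega,
            PySem.List.pyGet?, PySem.List.pyIdx?] <;> split_ifs <;> first | rfl | omega
    · by_cases h2 : angle < 135
      · simp [show ¬((10:Int) ≤ angle ∧ angle < 45) by omega, show ((45:Int) ≤ angle ∧ angle < 135) by omega,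
              show (45:Int) ≤ angle by omega, show ¬((135:Int) ≤ angle) by omega,
              PySem.List.pyGet?, PySem.List.pyIdx?] <;> split_ifs <;> first | rfl | omega
      · by_cases h3 : angle < 170
        · simp [show ¬((10:Int) ≤ angle ∧ angle < 45) by omega, show ¬((45:Int) ≤ angle ∧ angle < 135) by omega,
                show ((135:Int) ≤ angle ∧ angle < 170) by omega,
                show (45:Int) ≤ angle by omega, show (135:Int) ≤ angle by omega, show ¬((170:Int) ≤ angle) by omega,
                PySem.List.pyGet?, PySem.List.pyIdx?] <;> split_ifs <;> first | rfl | omega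
        · by_cases h4 : angle < 190
          · simp [show ¬((10:Int) ≤ angle ∧ angle < 45) by omega, show ¬((45:Int) ≤ angle ∧ angle < 135) by omega,
                  show ¬((135:Int) ≤ angle ∧ angle < 170) by omega, show ((170:Int) ≤ angle ∧ angle < 190) by omega,
                  show (45:Int) ≤ angle by omega, show (135:Int) ≤ angle by omega, show (170:Int) ≤ angle by omega,
                  show ¬((190:Int) ≤ angle) by omega, PySem.List.pyGet?, PySem.List.pyIdx?] <;> split_ifs <;> first | rfl | omega
          · by_cases h5 : angle < 225
            · simp [show ¬((10:Int) ≤ angle ∧ angle < 45) by omega, show ¬((45:Int) ≤ angle ∧ angle < 135) by omega,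
                    show ¬((135:Int) ≤ angle ∧ angle < 170) by omega, show ¬((170:Int) ≤ angle ∧ angle < 190) by omega,
                    show ((190:Int) ≤ angle ∧ angle < 225) by omega,
                    show (45:Int) ≤ angle by omega, show (135:Int) ≤ angle by omega, show (170:Int) ≤ angle by omega,
                    show (190:Int) ≤ angle by omega, show ¬((225:Int) ≤ angle) by omega,
                    PySem.List.pyGet?, PySem.List.pyIdx?] <;> split_ifs <;> first | rfl | omega
            · by_cases h6 : angle < 315
              · simp [show ¬((10:Int) ≤ angle ∧ angle < 45) by omega, show ¬((45:Int) ≤ angle ∧ angle < 135) by omega,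
                      show ¬((135:Int) ≤ angle ∧ angle < 170) by omega, show ¬((170:Int) ≤ angle ∧ angle < 190) by omega,
                      show ¬((190:Int) ≤ angle ∧ angle < 225) by omega, show ((225:Int) ≤ angle ∧ angle < 315) by omega,
                      show (45:Int) ≤ angle by omega, show (135:Int) ≤ angle by omega, show (170:Int) ≤ angle by omega,
                      show (190:Int) ≤ angle by omega, show (225:Int) ≤ angle by omega,
                      show ¬((315:Int) ≤ angle) by omega, PySem.List.pyGet?, PySem.List.pyIdx?] <;> split_ifs <;> first | rfl | omega
              · simp [show ¬((10:Int) ≤ angle ∧ angle < 45) by omega, show ¬((45:Int) ≤ angle ∧ angle < 135) by omega,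
                      show ¬((135:Int) ≤ angle ∧ angle < 170) by omega, show ¬((170:Int) ≤ angle ∧ angle < 190) by omega,
                      show ¬((190:Int) ≤ angle ∧ angle < 225) by omega, show ¬((225:Int) ≤ angle ∧ angle < 315) by omega,
                      show ((315:Int) ≤ angle ∧ angle < 350) by omega,
                      show (45:Int) ≤ angle by omega, show (135:Int) ≤ angle by omega, show (170:Int) ≤ angle by omega,
                      show (190:Int) ≤ angle by omega, show (225:Int) ≤ angle by omega, show (315:Int) ≤ angle by omega,
                      PySem.List.pyGet?, PySem.List.pyIdx?] <;> split_ifs <;> first | rfl | omega
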